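-- pv_equiv track=rewrite | github.com/a-mircoli/big-gui | app/BIG2/NewBigOriginale/newbig.py | riordina
-- ===== SOURCE A (Python) =====
-- def riordina(W, minimo, W1):
--   for i in range(len(W)):
--     arc = W[i]
--     e0 = arc[0]
--     e1 = arc[1]
--     if e0[0] == minimo and arc not in W1:
--       W1.append(arc)
--
--   for j in range(len(W)):
--     arco = W[j]
--     a0 = arco[0]
--     a1 = arco[1]
--     if a0[0] == minimo:
--       W1 = riordina(W, a1[0], W1)
--
--   return W1
-- ===== SOURCE B (Python) =====
-- # B: index arcs by source node once, and keep a visited-node set so every node is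
-- # expanded at most once, plus a seen-arc set instead of 'arc not in W1' list scans.
-- # Like A, appends the new arcs to W1 in place and returns it.
-- def riordina(W, minimo, W1):
--     index = {}
--     for arc in W:
--         if arc[0]:
--             index.setdefault(arc[0][0], []).append(arc)
--     seen = set((tuple(arc[0]), tuple(arc[1])) for arc in W1)
--     visited = set()
--
--     def visit(node):
--         if node in visited:
--             return
--         visited.add(node)
--         for arc in index.get(node, []):
--             key = (tuple(arc[0]), tuple(arc[1]))
--             if key not in seen:
--                 seen.add(key)
--                 W1.append(arc)
--         for arc in index.get(node, []):
--             if arc[1]: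
--                 visit(arc[1][0])
--
--     visit(minimo)
--     return W1
-- ===== Notes on version B (the rewrite author's own statement) =====
-- stated objective: alternative
-- what changed: B builds a dict indexing arcs by source node once and keeps a visited-node set plus a seen-arc set, so each node is expanded at most once and duplicate membership tests use a set, instead of A's unguarded re-recursion into already-handled nodes and its 'arc not in W1' list scans.
import Mathlib
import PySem

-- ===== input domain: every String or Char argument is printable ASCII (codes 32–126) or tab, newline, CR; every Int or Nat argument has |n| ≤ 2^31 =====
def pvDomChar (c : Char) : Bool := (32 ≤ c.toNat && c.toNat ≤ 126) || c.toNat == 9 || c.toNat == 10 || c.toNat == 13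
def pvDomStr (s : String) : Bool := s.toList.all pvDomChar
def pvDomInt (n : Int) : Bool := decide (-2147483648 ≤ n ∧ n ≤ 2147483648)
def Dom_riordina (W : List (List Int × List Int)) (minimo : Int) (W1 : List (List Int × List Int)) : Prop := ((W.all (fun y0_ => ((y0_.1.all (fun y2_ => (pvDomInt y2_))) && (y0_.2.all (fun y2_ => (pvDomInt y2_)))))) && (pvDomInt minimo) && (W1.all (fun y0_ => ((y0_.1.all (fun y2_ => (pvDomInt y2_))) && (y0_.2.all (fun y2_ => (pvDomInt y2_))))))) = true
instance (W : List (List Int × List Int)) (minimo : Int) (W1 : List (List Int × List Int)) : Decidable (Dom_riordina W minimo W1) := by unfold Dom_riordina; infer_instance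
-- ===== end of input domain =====

-- B restructures the traversal: arcs are indexed by source node in a dict built once, and
-- a visited-node set and a seen-arc set replace A's re-descent into already-handled nodes
-- and its 'arc not in W1' list scans; equivalence is about the RETURN value (both Pythons
-- also append the new arcs to W1 in place).

-- ===== PORT A =====
-- Python A recurses without any visited bookkeeping; under Pre_riordina the recursion
-- depth is at most the number of distinct reachable nodes ≤ W.length + 1, so this fuel
-- makes the port total and exact on Pre_. 'e0[0]'/'a1[0]' are via head? (= xs[0]);
-- where Python would raise IndexError (empty list, excluded by Pre_) the port skips.
def riordinaFuel : Nat → List (List Int × List Int) → Int → List (List Int × List Int) → List (List Int × List Int)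
  | 0, _, _, W1 => W1
  | f+1, W, minimo, W1 =>
    -- second loop ('for j in range(len(W))'), run on the result of the first loop
    W.foldl (fun acc arc =>
        if arc.1.head? = some minimo then
          match arc.2.head? with
          | some t => riordinaFuel f W t acc
          | none => acc
        else acc)
      -- first loop ('for i in range(len(W))'): append arcs from minimo not yet in W1
      (W.foldl (fun acc arc =>
        if arc.1.head? = some minimo ∧ arc ∉ acc then acc ++ [arc] else acc) W1)

def riordina (W : List (List Int × List Int)) (minimo : Int) (W1 : List (List Int × List Int)) : List (List Int × List Int) :=
  riordinaFuel (W.length + 1) W minimo W1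

-- ===== PORT B =====
-- index.setdefault(arc[0][0], []).append(arc)  (dict from source node to its arcs, in W order)
def pvIndex (W : List (List Int × List Int)) : PySem.Dict Int (List (List Int × List Int)) :=
  W.foldl (fun d arc =>
    match arc.1.head? with
    | some s => d.modify s [] (· ++ [arc])
    | none => d) PySem.Dict.empty

-- visit(node) of Source B; state = (visited, seen, W1). Source B's seen holds the arcs as
-- tuple pairs — an injective image, ported as the arcs themselves. The fuel only
-- guards termination: each descent visits a fresh node, so W.length + 1 is never
-- exhausted and the port returns exactly what Source B returns.
def pvVisit (index : PySem.Dict Int (List (List Int × List Int))) :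
    Nat → Int → PySem.Set Int → PySem.Set (List Int × List Int) → List (List Int × List Int) →
    PySem.Set Int × PySem.Set (List Int × List Int) × List (List Int × List Int)
  | 0, _, vis, seen, out => (vis, seen, out)
  | g+1, node, vis, seen, out =>
    if node ∈ vis then (vis, seen, out)
    else
      let vis1 := PySem.Set.add vis node
      let p := (index.getD node []).foldl
        (fun (p : PySem.Set (List Int × List Int) × List (List Int × List Int)) arc =>
          if arc ∈ p.1 then p else (PySem.Set.add p.1 arc, p.2 ++ [arc]))
        (seen, out)
      (index.getD node []).foldl
        (fun st arc =>
          match arc.2.head? with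
          | some t => pvVisit index g t st.1 st.2.1 st.2.2
          | none => st)
        (vis1, p.1, p.2)

def riordina_alt (W : List (List Int × List Int)) (minimo : Int) (W1 : List (List Int × List Int)) : List (List Int × List Int) :=
  (pvVisit (pvIndex W) (W.length + 1) minimo PySem.Set.empty (PySem.Set.ofList W1) W1).2.2

-- ===== PRECONDITION & SPEC =====
-- one step of reachable-set expansion over the arcs of W
def pvStep (W : List (List Int × List Int)) (S : PySem.Set Int) : PySem.Set Int :=
  PySem.Set.update S (W.filterMap (fun arc =>
    match arc.1.head?, arc.2.head? with
    | some a, some b => if a ∈ S then some b else none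
    | _, _ => none))

def pvClosure (W : List (List Int × List Int)) (S0 : PySem.Set Int) : PySem.Set Int :=
  (pvStep W)^[S0.length + W.length + 1] S0

def pvSuccs (W : List (List Int × List Int)) (v : Int) : PySem.Set Int :=
  PySem.Set.ofList (W.filterMap (fun arc => if arc.1.head? = some v then arc.2.head? else none))

-- Pre_: exactly the inputs on which Python's riordina returns normally: every arc has a
-- nonempty source list (the first loop indexes e0[0] of every arc), every arc whose
-- source node is reachable from minimo has a nonempty target list (the second loop
-- indexes a1[0] there), and no node reachable from minimo lies on a cycle (otherwise
-- the recursion never terminates and Python raises RecursionError).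
def Pre_riordina (W : List (List Int × List Int)) (minimo : Int) (W1 : List (List Int × List Int)) : Prop :=
  (∀ arc ∈ W, arc.1 ≠ []) ∧
  (∀ arc ∈ W, ∀ s, arc.1.head? = some s → s ∈ pvClosure W (PySem.Set.ofList [minimo]) → arc.2 ≠ []) ∧
  (∀ v ∈ pvClosure W (PySem.Set.ofList [minimo]), v ∉ pvClosure W (pvSuccs W v))

instance (W : List (List Int × List Int)) (minimo : Int) (W1 : List (List Int × List Int)) : Decidable (Pre_riordina W minimo W1) := by unfold Pre_riordina; infer_instance

def pvWitness_riordina : (List (List Int × List Int)) × Int × (List (List Int × List Int)) :=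
  ([([1], [2]), ([2], [3])], 1, [])

def Spec_riordina (W : List (List Int × List Int)) (minimo : Int) (W1 : List (List Int × List Int)) (out : List (List Int × List Int)) : Prop := out = riordina_alt W minimo W1
instance (W : List (List Int × List Int)) (minimo : Int) (W1 : List (List Int × List Int)) (out : List (List Int × List Int)) : Decidable (Spec_riordina W minimo W1 out) := by unfold Spec_riordina; infer_instance

-- ===== CLAIM (what is proved, stated in full; the proofs are below) =====
def Claim_equal_riordina : Prop := ∀ (W : List (List Int × List Int)) (minimo : Int) (W1 : List (List Int × List Int)), Dom_riordina W minimo W1 → Pre_riordina W minimo W1 → Spec_riordina W minimo W1 (riordina W minimo W1)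

-- ===== LEMMAS AND PROOFS =====
abbrev PvArc : Type := List Int × List Int

def pvEdge (W : List PvArc) (a b : Int) : Prop :=
  ∃ arc ∈ W, arc.1.head? = some a ∧ arc.2.head? = some b

def pvReach (W : List PvArc) : Int → Int → Prop := Relation.ReflTransGen (pvEdge W)

def pvReachP (W : List PvArc) (a b : Int) : Prop := ∃ c, pvEdge W a c ∧ pvReach W c b

-- every arc of W whose source is reachable from v already lies in L
def pvAllIn (W : List PvArc) (v : Int) (L : List PvArc) : Prop :=
  ∀ arc ∈ W, ∀ u, arc.1.head? = some u → pvReach W v u → arc ∈ L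

-- number of universe nodes not yet visited (the joint induction measure)
def pvK (U : List Int) (vis : List Int) : Nat := (U.toFinset.filter (fun v => v ∉ vis)).card

-- the node universe: minimo and every target head
def pvU (W : List PvArc) (m : Int) : List Int := m :: W.filterMap (fun a => a.2.head?)

theorem pvMemAdd {s : PySem.Set Int} {x y : Int} : y ∈ PySem.Set.add s x ↔ y ∈ s ∨ y = x :=
  PySem.Set.mem_add _ _ _

theorem pvK_antitone (U : List Int) (vis vis' : List Int) (h : ∀ v ∈ vis, v ∈ vis') :
    pvK U vis' ≤ pvK U vis := by
  apply Finset.card_le_card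
  intro v hv
  simp only [Finset.mem_filter] at *
  exact ⟨hv.1, fun hm => hv.2 (h v hm)⟩

theorem pvK_pos (U : List Int) (vis : List Int) (m : Int) (hU : m ∈ U) (hm : m ∉ vis) :
    0 < pvK U vis := by
  apply Finset.card_pos.2
  exact ⟨m, by simp [pvK, Finset.mem_filter, List.mem_toFinset, hU, hm]⟩

theorem pvK_add_lt (U : List Int) (vis : List Int) (m : Int) (hU : m ∈ U) (hm : m ∉ vis) :
    pvK U (PySem.Set.add vis m) < pvK U vis := by
  apply Finset.card_lt_card
  constructor
  · intro v hv
    simp only [Finset.mem_filter, List.mem_toFinset, PySem.Set.mem_add] at *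
    exact ⟨hv.1, fun h => hv.2 (Or.inl h)⟩
  · intro hsub
    have := hsub (by simp [Finset.mem_filter, List.mem_toFinset, hU, hm] :
      m ∈ U.toFinset.filter (fun v => v ∉ vis))
    simp [Finset.mem_filter, PySem.Set.mem_add] at this

-- generic: a fold whose step only appends, extends
theorem pvFoldl_ext {β : Type} (step : List PvArc → β → List PvArc)
    (h : ∀ acc x, ∃ e, step acc x = acc ++ e) :
    ∀ (l : List β) (acc : List PvArc), ∃ E, l.foldl step acc = acc ++ E := by
  intro l
  induction l with
  | nil => intro acc; exact ⟨[], by simp⟩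
  | cons a l ih =>
    intro acc
    obtain ⟨e, he⟩ := h acc a
    obtain ⟨E, hE⟩ := ih (step acc a)
    exact ⟨e ++ E, by rw [List.foldl_cons, hE, he, List.append_assoc]⟩

theorem pvFold1_id (m : Int) :
    ∀ (l : List PvArc) (acc : List PvArc),
    (∀ arc ∈ l, arc.1.head? = some m → arc ∈ acc) →
    l.foldl (fun acc arc => if arc.1.head? = some m ∧ arc ∉ acc then acc ++ [arc] else acc) acc = acc := by
  intro l
  induction l with
  | nil => intro acc _; rfl
  | cons a l ih =>
    intro acc h
    simp only [List.foldl_cons]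
    have : ¬ (a.1.head? = some m ∧ a ∉ acc) := by
      rintro ⟨h1, h2⟩; exact h2 (h a (by simp) h1)
    rw [if_neg this]
    exact ih acc (fun arc hm => h arc (by simp [hm]))

theorem pvFold2_id (m : Int) (f : Nat) (W : List PvArc) :
    ∀ (l : List PvArc) (acc : List PvArc),
    (∀ arc ∈ l, ∀ t, arc.1.head? = some m → arc.2.head? = some t → riordinaFuel f W t acc = acc) →
    l.foldl (fun acc arc =>
        if arc.1.head? = some m then
          match arc.2.head? with
          | some t => riordinaFuel f W t acc
          | none => acc
        else acc) acc = acc := by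
  intro l
  induction l with
  | nil => intro acc _; rfl
  | cons a l ih =>
    intro acc h
    simp only [List.foldl_cons]
    have hstep : (if a.1.head? = some m then
        match a.2.head? with
        | some t => riordinaFuel f W t acc
        | none => acc
        else acc) = acc := by
      by_cases h1 : a.1.head? = some m
      · simp only [h1, if_true]
        cases ht : a.2.head? with
        | none => rfl
        | some t => exact h a (by simp) t h1 ht
      · simp [h1]
    rw [hstep]
    exact ih acc (fun arc hm => h arc (by simp [hm]))

theorem pvAbsorb (W : List PvArc) (m : Int) (out : List PvArc) (h : pvAllIn W m out) :
    ∀ f, riordinaFuel f W m out = out := by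
  intro f
  induction f generalizing m h with
  | zero => rfl
  | succ f ih =>
    simp only [riordinaFuel]
    rw [pvFold1_id m W out (fun arc hm h1 => h arc hm m h1 Relation.ReflTransGen.refl)]
    apply pvFold2_id
    intro arc hm t h1 ht
    apply ih t
    intro arc' hm' u h1' hr
    exact h arc' hm' u h1' (Relation.ReflTransGen.head ⟨arc, hm, h1, ht⟩ hr)

theorem pvIndex_getD_aux (s : Int) :
    ∀ (l : List PvArc) (d : PySem.Dict Int (List PvArc)),
    (l.foldl (fun d arc =>
      match arc.1.head? with
      | some t => d.modify t [] (· ++ [arc])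
      | none => d) d).getD s []
    = d.getD s [] ++ l.filter (fun a => decide (a.1.head? = some s)) := by
  intro l
  induction l with
  | nil => intro d; simp
  | cons a l ih =>
    intro d
    simp only [List.foldl_cons]
    cases ha : a.1.head? with
    | none =>
      rw [ih d]
      simp [List.filter_cons, ha]
    | some t =>
      rw [ih (d.modify t [] (· ++ [a]))]
      rw [PySem.Dict.getD_modify]
      by_cases hst : s = t
      · subst hst
        simp [List.filter_cons, ha]
      · simp [List.filter_cons, ha, hst, Ne.symm hst]

theorem pvIndex_getD (W : List PvArc) (s : Int) :
    (pvIndex W).getD s [] = W.filter (fun a => decide (a.1.head? = some s)) := by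
  unfold pvIndex
  rw [pvIndex_getD_aux s W PySem.Dict.empty]
  simp

theorem pvFold1_filter (m : Int) :
    ∀ (l : List PvArc) (acc : List PvArc),
    l.foldl (fun acc arc => if arc.1.head? = some m ∧ arc ∉ acc then acc ++ [arc] else acc) acc
    = (l.filter (fun a => decide (a.1.head? = some m))).foldl
        (fun acc arc => if arc ∉ acc then acc ++ [arc] else acc) acc := by
  intro l
  induction l with
  | nil => intro acc; rfl
  | cons a l ih =>
    intro acc
    by_cases h1 : a.1.head? = some m
    · rw [List.filter_cons_of_pos (by simp [h1]), List.foldl_cons, List.foldl_cons]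
      by_cases h2 : a ∈ acc
      · rw [if_neg (by rintro ⟨_, hn⟩; exact hn h2), if_neg (by simp [h2])]
        exact ih acc
      · rw [if_pos ⟨h1, h2⟩, if_pos h2]
        exact ih (acc ++ [a])
    · rw [List.filter_cons_of_neg (by simp [h1]), List.foldl_cons,
          if_neg (by rintro ⟨hc, _⟩; exact h1 hc)]
      exact ih acc

theorem pvFold2_filter (m : Int) (f : Nat) (W : List PvArc) :
    ∀ (l : List PvArc) (acc : List PvArc),
    l.foldl (fun acc arc =>
        if arc.1.head? = some m then
          match arc.2.head? with
          | some t => riordinaFuel f W t acc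
          | none => acc
        else acc) acc
    = (l.filter (fun a => decide (a.1.head? = some m))).foldl
        (fun acc arc =>
          match arc.2.head? with
          | some t => riordinaFuel f W t acc
          | none => acc) acc := by
  intro l
  induction l with
  | nil => intro acc; rfl
  | cons a l ih =>
    intro acc
    by_cases h1 : a.1.head? = some m
    · rw [List.filter_cons_of_pos (by simp [h1]), List.foldl_cons, List.foldl_cons, if_pos h1]
      exact ih _
    · rw [List.filter_cons_of_neg (by simp [h1]), List.foldl_cons, if_neg h1]
      exact ih acc

theorem pvFold1_mem (m : Int) :
    ∀ (l : List PvArc) (acc : List PvArc) (arc : PvArc), arc ∈ l → arc.1.head? = some m →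
    arc ∈ l.foldl (fun acc arc => if arc.1.head? = some m ∧ arc ∉ acc then acc ++ [arc] else acc) acc := by
  intro l
  induction l with
  | nil => intro acc arc h; simp at h
  | cons a l ih =>
    intro acc arc hmem hh
    simp only [List.foldl_cons]
    rcases List.mem_cons.1 hmem with h | h
    · subst h
      have harc : arc ∈ (if arc.1.head? = some m ∧ arc ∉ acc then acc ++ [arc] else acc) := by
        by_cases h2 : arc ∈ acc
        · rw [if_neg (by simp [h2])]; exact h2
        · rw [if_pos ⟨hh, h2⟩]; simp
      obtain ⟨E, hE⟩ := pvFoldl_ext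
        (fun acc arc => if arc.1.head? = some m ∧ arc ∉ acc then acc ++ [arc] else acc)
        (fun acc x => by
          by_cases h : x.1.head? = some m ∧ x ∉ acc
          · exact ⟨[x], by simp [h]⟩
          · exact ⟨[], by simp [h]⟩) l _
      rw [hE]
      exact List.mem_append_left _ harc
    · exact ih _ arc h hh

theorem pvPair1 (l : List PvArc) :
    ∀ (seen : PySem.Set PvArc) (out : List PvArc), (∀ a, a ∈ seen ↔ a ∈ out) →
    (l.foldl (fun p arc => if arc ∈ p.1 then p else (PySem.Set.add p.1 arc, p.2 ++ [arc])) (seen, out)).2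
      = l.foldl (fun acc arc => if arc ∉ acc then acc ++ [arc] else acc) out
    ∧ ∀ a, a ∈ (l.foldl (fun p arc => if arc ∈ p.1 then p else (PySem.Set.add p.1 arc, p.2 ++ [arc])) (seen, out)).1
      ↔ a ∈ l.foldl (fun acc arc => if arc ∉ acc then acc ++ [arc] else acc) out := by
  induction l with
  | nil => intro seen out h; exact ⟨rfl, h⟩
  | cons a l ih =>
    intro seen out h
    simp only [List.foldl_cons]
    by_cases ha : a ∈ seen
    · rw [if_pos ha, if_neg (by simp [(h a).1 ha])]
      exact ih seen out h
    · rw [if_neg ha, if_pos (fun hmem => ha ((h a).2 hmem))]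
      exact ih (PySem.Set.add seen a) (out ++ [a]) (fun x => by
        rw [PySem.Set.mem_add]
        constructor
        · rintro (hx | hx)
          · exact List.mem_append_left _ ((h x).1 hx)
          · subst hx; simp
        · intro hx
          rcases List.mem_append.1 hx with hx | hx
          · exact Or.inl ((h x).2 hx)
          · simp at hx; exact Or.inr hx)

-- joint postcondition of one paired traversal step
def pvPost (W : List PvArc) (U : List Int) (gray : Int → Prop) (vis : PySem.Set Int)
    (out : List PvArc) (r : PySem.Set Int × PySem.Set PvArc × List PvArc) (aout : List PvArc) : Prop :=
  aout = r.2.2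
  ∧ (∀ v ∈ vis, v ∈ r.1)
  ∧ r.1.Nodup
  ∧ (∀ v ∈ r.1, v ∈ U)
  ∧ (∀ v ∈ r.1, pvAllIn W v r.2.2 ∨ gray v)
  ∧ (∀ a, a ∈ r.2.1 ↔ a ∈ r.2.2)
  ∧ (∃ E, r.2.2 = out ++ E)

theorem pvPair2 (W : List PvArc) (U : List Int)
    (hU : ∀ arc ∈ W, ∀ t, arc.2.head? = some t → t ∈ U)
    (g f' : Nat) (m : Int) (gray : Int → Prop)
    (hAcycM : ∀ u, pvReach W m u → ¬ pvReachP W u u)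
    (hGrayM : ∀ u, pvReach W m u → ¬ gray u)
    (IH : ∀ (f : Nat) (m' : Int) (gray' : Int → Prop) (vis : PySem.Set Int)
      (seen : PySem.Set PvArc) (out : List PvArc),
      m' ∈ U → vis.Nodup → (∀ v ∈ vis, v ∈ U) → pvK U vis ≤ f → pvK U vis ≤ g →
      (∀ u, pvReach W m' u → ¬ pvReachP W u u) →
      (∀ u, pvReach W m' u → ¬ gray' u) →
      (∀ v ∈ vis, pvAllIn W v out ∨ gray' v) →
      (∀ a, a ∈ seen ↔ a ∈ out) →
      pvPost W U gray' vis out (pvVisit (pvIndex W) g m' vis seen out) (riordinaFuel f W m' out)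
      ∧ m' ∈ (pvVisit (pvIndex W) g m' vis seen out).1) :
    ∀ (l : List PvArc), (∀ arc ∈ l, arc ∈ W ∧ arc.1.head? = some m) →
    ∀ (vis : PySem.Set Int) (seen : PySem.Set PvArc) (out : List PvArc),
    vis.Nodup → (∀ v ∈ vis, v ∈ U) → pvK U vis ≤ f' → pvK U vis ≤ g →
    (∀ v ∈ vis, pvAllIn W v out ∨ gray v ∨ v = m) →
    (∀ a, a ∈ seen ↔ a ∈ out) →
    (l.foldl (fun acc arc =>
        match arc.2.head? with
        | some t => riordinaFuel f' W t acc
        | none => acc) out)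
      = (l.foldl (fun st arc =>
        match arc.2.head? with
        | some t => pvVisit (pvIndex W) g t st.1 st.2.1 st.2.2
        | none => st) (vis, seen, out)).2.2
    ∧ (let rb := l.foldl (fun st arc =>
        match arc.2.head? with
        | some t => pvVisit (pvIndex W) g t st.1 st.2.1 st.2.2
        | none => st) (vis, seen, out)
      (∀ v ∈ vis, v ∈ rb.1) ∧ rb.1.Nodup ∧ (∀ v ∈ rb.1, v ∈ U)
      ∧ (∀ v ∈ rb.1, pvAllIn W v rb.2.2 ∨ gray v ∨ v = m)
      ∧ (∀ a, a ∈ rb.2.1 ↔ a ∈ rb.2.2)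
      ∧ (∃ E, rb.2.2 = out ++ E)
      ∧ (∀ arc ∈ l, ∀ t, arc.2.head? = some t → t ∈ rb.1)) := by
  intro l
  induction l with
  | nil =>
    intro _ vis seen out hnd hvU _ _ hvis hseen
    refine ⟨rfl, fun v hv => hv, hnd, hvU, hvis, hseen, ⟨[], by simp⟩, by simp⟩
  | cons a l ih =>
    intro hl vis seen out hnd hvU hf hg hvis hseen
    obtain ⟨haW, ha1⟩ := hl a (by simp)
    simp only [List.foldl_cons]
    cases ht : a.2.head? with
    | none =>
      have := ih (fun arc hm => hl arc (by simp [hm])) vis seen out hnd hvU hf hg hvis hseen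
      refine ⟨this.1, this.2.1, this.2.2.1, this.2.2.2.1, this.2.2.2.2.1,
        this.2.2.2.2.2.1, this.2.2.2.2.2.2.1, ?_⟩
      intro arc hm t ht'
      rcases List.mem_cons.1 hm with h | h
      · subst h; rw [ht] at ht'; cases ht'
      · exact this.2.2.2.2.2.2.2 arc h t ht'
    | some t =>
      have hedge : pvEdge W m t := ⟨a, haW, ha1, ht⟩
      have hreach : pvReach W m t := Relation.ReflTransGen.single hedge
      have hmain := IH f' t (fun v => gray v ∨ v = m) vis seen out
        (hU a haW t ht) hnd hvU hf hg
        (fun u hu => hAcycM u (Relation.ReflTransGen.trans hreach hu))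
        (fun u hu => by
          rintro (hg' | rfl)
          · exact hGrayM u (Relation.ReflTransGen.trans hreach hu) hg'
          · exact hAcycM u Relation.ReflTransGen.refl ⟨t, hedge, hu⟩)
        hvis hseen
      obtain ⟨⟨haout, hsub, hnd', hvU', hvis', hseen', ⟨E1, hE1⟩⟩, htin⟩ := hmain
      have hrest := ih (fun arc hm => hl arc (by simp [hm]))
        (pvVisit (pvIndex W) g t vis seen out).1
        (pvVisit (pvIndex W) g t vis seen out).2.1
        (pvVisit (pvIndex W) g t vis seen out).2.2
        hnd' hvU'
        (le_trans (pvK_antitone U vis _ hsub) hf)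
        (le_trans (pvK_antitone U vis _ hsub) hg)
        hvis' hseen'
      obtain ⟨heq, hsub2, hnd2, hvU2, hvis2, hseen2, ⟨E2, hE2⟩, htg2⟩ := hrest
      simp only [ht]
      refine ⟨?_, ?_, hnd2, hvU2, hvis2, hseen2, ?_, ?_⟩
      · rw [haout]; exact heq
      · intro v hv; exact hsub2 v (hsub v hv)
      · exact ⟨E1 ++ E2, by rw [hE2, hE1, List.append_assoc]⟩
      · intro arc hm t' ht'
        rcases List.mem_cons.1 hm with h | h
        · subst h
          rw [ht] at ht'
          injection ht' with h2
          subst h2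
          exact hsub2 _ htin
        · exact htg2 arc h t' ht'

theorem pvMain (W : List PvArc) (U : List Int)
    (hU : ∀ arc ∈ W, ∀ t, arc.2.head? = some t → t ∈ U) :
    ∀ (g f : Nat) (m : Int) (gray : Int → Prop) (vis : PySem.Set Int)
      (seen : PySem.Set PvArc) (out : List PvArc),
    m ∈ U → vis.Nodup → (∀ v ∈ vis, v ∈ U) → pvK U vis ≤ f → pvK U vis ≤ g →
    (∀ u, pvReach W m u → ¬ pvReachP W u u) →
    (∀ u, pvReach W m u → ¬ gray u) →
    (∀ v ∈ vis, pvAllIn W v out ∨ gray v) →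
    (∀ a, a ∈ seen ↔ a ∈ out) →
    pvPost W U gray vis out (pvVisit (pvIndex W) g m vis seen out) (riordinaFuel f W m out)
    ∧ m ∈ (pvVisit (pvIndex W) g m vis seen out).1 := by
  intro g
  induction g with
  | zero =>
    intro f m gray vis seen out hmU hnd hvU hf hg hAcyc hGray hvis hseen
    by_cases hmvis : m ∈ vis
    · have hr : pvVisit (pvIndex W) 0 m vis seen out = (vis, seen, out) := rfl
      rw [hr]
      have habs : pvAllIn W m out := by
        rcases hvis m hmvis with h | h
        · exact h
        · exact absurd h (hGray m Relation.ReflTransGen.refl)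
      exact ⟨⟨pvAbsorb W m out habs f, fun v hv => hv, hnd, hvU, hvis, hseen, ⟨[], by simp⟩⟩, hmvis⟩
    · exact absurd hg (by have := pvK_pos U vis m hmU hmvis; omega)
  | succ g ihg =>
    intro f m gray vis seen out hmU hnd hvU hf hg hAcyc hGray hvis hseen
    by_cases hmvis : m ∈ vis
    · have hr : pvVisit (pvIndex W) (g+1) m vis seen out = (vis, seen, out) := by
        simp [pvVisit, hmvis]
      rw [hr]
      have habs : pvAllIn W m out := by
        rcases hvis m hmvis with h | h
        · exact h
        · exact absurd h (hGray m Relation.ReflTransGen.refl)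
      exact ⟨⟨pvAbsorb W m out habs f, fun v hv => hv, hnd, hvU, hvis, hseen, ⟨[], by simp⟩⟩, hmvis⟩
    · cases f with
      | zero => exact absurd hf (by have := pvK_pos U vis m hmU hmvis; omega)
      | succ f' =>
        have hLf := pvIndex_getD W m
        have hBdef : pvVisit (pvIndex W) (g+1) m vis seen out
            = (W.filter (fun a => decide (a.1.head? = some m))).foldl
                (fun st arc => match arc.2.head? with
                  | some t => pvVisit (pvIndex W) g t st.1 st.2.1 st.2.2
                  | none => st)
                (PySem.Set.add vis m,
                 ((W.filter (fun a => decide (a.1.head? = some m))).foldl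
                    (fun p arc => if arc ∈ p.1 then p else (PySem.Set.add p.1 arc, p.2 ++ [arc])) (seen, out)).1,
                 ((W.filter (fun a => decide (a.1.head? = some m))).foldl
                    (fun p arc => if arc ∈ p.1 then p else (PySem.Set.add p.1 arc, p.2 ++ [arc])) (seen, out)).2) := by
          simp only [pvVisit, if_neg hmvis, hLf]
        have hAdef : riordinaFuel (f'+1) W m out
            = (W.filter (fun a => decide (a.1.head? = some m))).foldl
                (fun acc arc => match arc.2.head? with
                  | some t => riordinaFuel f' W t acc
                  | none => acc)
                ((W.filter (fun a => decide (a.1.head? = some m))).foldl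
                  (fun acc arc => if arc ∉ acc then acc ++ [arc] else acc) out) := by
          simp only [riordinaFuel]
          rw [pvFold1_filter m W out, pvFold2_filter m f' W W]
        obtain ⟨hp2, hp1⟩ := pvPair1 (W.filter (fun a => decide (a.1.head? = some m))) seen out hseen
        obtain ⟨E0, hE0⟩ := pvFoldl_ext
          (fun acc arc => if arc ∉ acc then acc ++ [arc] else acc)
          (fun acc arc => by
            by_cases h : arc ∈ acc
            · exact ⟨[], by simp [h]⟩
            · exact ⟨[arc], by simp [h]⟩)
          (W.filter (fun a => decide (a.1.head? = some m))) out
        have hnd1 : (PySem.Set.add vis m).Nodup := PySem.Set.nodup_add _ _ hnd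
        have hvU1 : ∀ v ∈ PySem.Set.add vis m, v ∈ U := by
          intro v hv
          rcases pvMemAdd.1 hv with h | h
          · exact hvU v h
          · subst h; exact hmU
        have hK1 : pvK U (PySem.Set.add vis m) < pvK U vis := pvK_add_lt U vis m hmU hmvis
        have hvis1 : ∀ v ∈ PySem.Set.add vis m,
            pvAllIn W v ((W.filter (fun a => decide (a.1.head? = some m))).foldl
              (fun acc arc => if arc ∉ acc then acc ++ [arc] else acc) out) ∨ gray v ∨ v = m := by
          intro v hv
          rcases pvMemAdd.1 hv with h | h
          · rcases hvis v h with h' | h'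
            · left
              intro arc hmW u h1 hr
              rw [hE0]
              exact List.mem_append_left _ (h' arc hmW u h1 hr)
            · exact Or.inr (Or.inl h')
          · exact Or.inr (Or.inr h)
        have hl : ∀ arc ∈ W.filter (fun a => decide (a.1.head? = some m)), arc ∈ W ∧ arc.1.head? = some m := by
          intro arc h
          exact ⟨(List.mem_filter.1 h).1, of_decide_eq_true (List.mem_filter.1 h).2⟩
        obtain ⟨heq, hsub2, hnd2, hvU2, hvis2, hseen2, ⟨E2, hE2⟩, htargets⟩ :=
          pvPair2 W U hU g f' m gray hAcyc hGray ihg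
            (W.filter (fun a => decide (a.1.head? = some m))) hl
            (PySem.Set.add vis m)
            ((W.filter (fun a => decide (a.1.head? = some m))).foldl
              (fun p arc => if arc ∈ p.1 then p else (PySem.Set.add p.1 arc, p.2 ++ [arc])) (seen, out)).1
            ((W.filter (fun a => decide (a.1.head? = some m))).foldl
              (fun acc arc => if arc ∉ acc then acc ++ [arc] else acc) out)
            hnd1 hvU1 (by omega) (by omega) hvis1 hp1
        rw [hBdef, hp2]
        set Lf := W.filter (fun a => decide (a.1.head? = some m)) with hLfdef
        set out1 := Lf.foldl (fun acc arc => if arc ∉ acc then acc ++ [arc] else acc) out with hout1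
        set rb := Lf.foldl
            (fun st arc => match arc.2.head? with
              | some t => pvVisit (pvIndex W) g t st.1 st.2.1 st.2.2
              | none => st)
            (PySem.Set.add vis m,
             (Lf.foldl (fun p arc => if arc ∈ p.1 then p else (PySem.Set.add p.1 arc, p.2 ++ [arc])) (seen, out)).1,
             out1) with hrb
        have hAllm : pvAllIn W m rb.2.2 := by
          intro arc hmW u h1 hr
          rcases (Relation.ReflTransGen.cases_head hr) with h | ⟨c, hedge, hrc⟩
          · subst h
            have harc : arc ∈ out1 := by
              have h0 := pvFold1_mem m W out arc hmW h1
              rw [pvFold1_filter m W out] at h0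
              exact h0
            rw [hE2]
            exact List.mem_append_left _ harc
          · obtain ⟨arc2, harc2W, harc21, harc22⟩ := hedge
            have harc2Lf : arc2 ∈ Lf := List.mem_filter.2 ⟨harc2W, by simp [harc21]⟩
            have hcin : c ∈ rb.1 := htargets arc2 harc2Lf c harc22
            rcases hvis2 c hcin with h2 | h2 | h2
            · exact h2 arc hmW u h1 hrc
            · exact absurd h2 (hGray c (Relation.ReflTransGen.single ⟨arc2, harc2W, harc21, harc22⟩))
            · subst h2
              exact absurd (⟨c, ⟨arc2, harc2W, harc21, harc22⟩, Relation.ReflTransGen.refl⟩ : pvReachP W c c)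
                (hAcyc c Relation.ReflTransGen.refl)
        refine ⟨⟨?_, ?_, hnd2, hvU2, ?_, hseen2, ?_⟩, ?_⟩
        · rw [hAdef]; exact heq
        · intro v hv
          exact hsub2 v (pvMemAdd.2 (Or.inl hv))
        · intro v hv
          rcases hvis2 v hv with h2 | h2 | h2
          · exact Or.inl h2
          · exact Or.inr h2
          · subst h2; exact Or.inl hAllm
        · exact ⟨E0 ++ E2, by rw [hE2, hE0, List.append_assoc]⟩
        · exact hsub2 m (pvMemAdd.2 (Or.inr rfl))

theorem pvStep_mem (W : List PvArc) (S : PySem.Set Int) (b : Int) :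
    b ∈ pvStep W S ↔ b ∈ S ∨ ∃ arc ∈ W, ∃ a, arc.1.head? = some a ∧ arc.2.head? = some b ∧ a ∈ S := by
  unfold pvStep
  rw [PySem.Set.mem_update]
  simp only [List.mem_filterMap]
  constructor
  · rintro (h | ⟨arc, hm, hf⟩)
    · exact Or.inl h
    · cases h1 : arc.1.head? with
      | none => rw [h1] at hf; cases hf
      | some a =>
        cases h2 : arc.2.head? with
        | none => rw [h1, h2] at hf; cases hf
        | some b2 =>
          rw [h1, h2] at hf
          have hf2 : (if a ∈ S then some b2 else none) = some b := hf
          by_cases ha : a ∈ S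
          · rw [if_pos ha] at hf2
            injection hf2 with hb
            subst hb
            exact Or.inr ⟨arc, hm, a, h1, h2, ha⟩
          · rw [if_neg ha] at hf2; cases hf2
  · rintro (h | ⟨arc, hm, a, h1, h2, ha⟩)
    · exact Or.inl h
    · refine Or.inr ⟨arc, hm, ?_⟩
      rw [h1, h2]
      exact (by rw [if_pos ha] : (if a ∈ S then some b else none) = some b)

theorem pvStep_ext (W : List PvArc) (S : PySem.Set Int) : ∃ E, pvStep W S = S ++ E := by
  unfold pvStep
  rw [PySem.Set.update_eq_append_filter]
  exact ⟨_, rfl⟩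

theorem pvIter_nodup (W : List PvArc) (S0 : PySem.Set Int) (h0 : S0.Nodup) :
    ∀ k, ((pvStep W)^[k] S0).Nodup := by
  intro k
  induction k with
  | zero => exact h0
  | succ k ih => rw [Function.iterate_succ_apply']; exact PySem.Set.nodup_update _ _ ih

theorem pvIter_subset (W : List PvArc) (S0 : PySem.Set Int) :
    ∀ k, ∀ x ∈ (pvStep W)^[k] S0, x ∈ S0 ++ W.filterMap (fun a => a.2.head?) := by
  intro k
  induction k with
  | zero => intro x hx; exact List.mem_append_left _ hx
  | succ k ih =>
    intro x hx
    rw [Function.iterate_succ_apply'] at hx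
    rcases (pvStep_mem W _ x).1 hx with h | ⟨arc, hm, a, _, h2, _⟩
    · exact ih x h
    · exact List.mem_append_right _ (List.mem_filterMap.2 ⟨arc, hm, h2⟩)

theorem pvIter_len_le (W : List PvArc) (S0 : PySem.Set Int) (h0 : S0.Nodup) (k : Nat) :
    ((pvStep W)^[k] S0).length ≤ S0.length + W.length := by
  have hnd := pvIter_nodup W S0 h0 k
  have hsub := pvIter_subset W S0 k
  calc ((pvStep W)^[k] S0).length = ((pvStep W)^[k] S0).toFinset.card :=
        (List.toFinset_card_of_nodup hnd).symm
    _ ≤ (S0 ++ W.filterMap (fun a => a.2.head?)).toFinset.card :=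
        Finset.card_le_card (fun x hx => List.mem_toFinset.2 (hsub x (List.mem_toFinset.1 hx)))
    _ ≤ (S0 ++ W.filterMap (fun a => a.2.head?)).length := List.toFinset_card_le _
    _ ≤ S0.length + W.length := by
        rw [List.length_append]
        have := List.length_filterMap_le (fun (a : PvArc) => a.2.head?) W
        omega

theorem pvClosure_fix (W : List PvArc) (S0 : PySem.Set Int) (h0 : S0.Nodup) :
    pvStep W (pvClosure W S0) = pvClosure W S0 := by
  have hstep : ∀ S : PySem.Set Int, pvStep W S = S ∨ S.length < (pvStep W S).length := by
    intro S
    obtain ⟨E, hE⟩ := pvStep_ext W S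
    cases E with
    | nil => left; simp [hE]
    | cons e E => right; rw [hE]; simp
  by_cases hfix : ∃ k, k ≤ S0.length + W.length ∧ pvStep W ((pvStep W)^[k] S0) = (pvStep W)^[k] S0
  · obtain ⟨k, hk, hfx⟩ := hfix
    have hprop : ∀ j, (pvStep W)^[k + j] S0 = (pvStep W)^[k] S0 := by
      intro j
      induction j with
      | zero => rfl
      | succ j ih => rw [show k + (j+1) = (k+j) + 1 by omega, Function.iterate_succ_apply', ih, hfx]
    have hN : pvClosure W S0 = (pvStep W)^[k] S0 := by
      unfold pvClosure
      rw [show S0.length + W.length + 1 = k + (S0.length + W.length + 1 - k) by omega]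
      exact hprop _
    rw [hN, hfx]
  · exfalso
    push_neg at hfix
    have hgrow : ∀ k, k ≤ S0.length + W.length + 1 → S0.length + k ≤ ((pvStep W)^[k] S0).length := by
      intro k
      induction k with
      | zero => simp
      | succ k ih =>
        intro hk
        rcases hstep ((pvStep W)^[k] S0) with h | h
        · exact absurd h (hfix k (by omega))
        · have := ih (by omega)
          rw [Function.iterate_succ_apply']
          omega
    have h1 := hgrow (S0.length + W.length + 1) le_rfl
    have h2 := pvIter_len_le W S0 h0 (S0.length + W.length + 1)
    omega

theorem pvIter_init (W : List PvArc) (S0 : PySem.Set Int) :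
    ∀ k, ∀ x ∈ S0, x ∈ (pvStep W)^[k] S0 := by
  intro k
  induction k with
  | zero => exact fun x hx => hx
  | succ k ih =>
    intro x hx
    rw [Function.iterate_succ_apply']
    exact (pvStep_mem W _ x).2 (Or.inl (ih x hx))

theorem pvClosure_complete (W : List PvArc) (S0 : PySem.Set Int) (h0 : S0.Nodup)
    (a u : Int) (ha : a ∈ S0) (hr : pvReach W a u) : u ∈ pvClosure W S0 := by
  induction hr with
  | refl => exact pvIter_init W S0 _ a ha
  | tail h e ih =>
    obtain ⟨arc, hm, h1, h2⟩ := e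
    rw [← pvClosure_fix W S0 h0]
    exact (pvStep_mem W _ _).2 (Or.inr ⟨arc, hm, _, h1, h2, ih⟩)

theorem pvSuccs_mem (W : List PvArc) (v c : Int) :
    c ∈ pvSuccs W v ↔ ∃ arc ∈ W, arc.1.head? = some v ∧ arc.2.head? = some c := by
  unfold pvSuccs
  rw [PySem.Set.mem_ofList]
  simp only [List.mem_filterMap]
  constructor
  · rintro ⟨arc, hm, hf⟩
    by_cases h1 : arc.1.head? = some v
    · rw [if_pos h1] at hf
      exact ⟨arc, hm, h1, hf⟩
    · rw [if_neg h1] at hf; cases hf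
  · rintro ⟨arc, hm, h1, h2⟩
    refine ⟨arc, hm, ?_⟩
    rw [if_pos h1]; exact h2

theorem pvPre_acyc (W : List PvArc) (minimo : Int)
    (hpre : ∀ v ∈ pvClosure W (PySem.Set.ofList [minimo]), v ∉ pvClosure W (pvSuccs W v)) :
    ∀ u, pvReach W minimo u → ¬ pvReachP W u u := by
  rintro u hu ⟨c, hedge, hcu⟩
  have h1 : u ∈ pvClosure W (PySem.Set.ofList [minimo]) :=
    pvClosure_complete W _ (PySem.Set.nodup_ofList _) minimo u ((PySem.Set.mem_ofList _ _).2 (by simp)) hu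
  have h2 : u ∈ pvClosure W (pvSuccs W u) := by
    obtain ⟨arc, hm, ha1, ha2⟩ := hedge
    exact pvClosure_complete W _ (PySem.Set.nodup_ofList _) c u
      ((pvSuccs_mem W u c).2 ⟨arc, hm, ha1, ha2⟩) hcu
  exact hpre u h1 h2

-- ===== VERDICT (by name: the statement is the Claim_ definition above) =====
theorem riordina_spec : Claim_equal_riordina := by
  unfold Claim_equal_riordina
  intro W minimo W1 _dom hpre
  unfold Spec_riordina riordina riordina_alt
  have hU : ∀ arc ∈ W, ∀ t, arc.2.head? = some t → t ∈ pvU W minimo := by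
    intro arc hm t ht
    exact List.mem_cons_of_mem _ (List.mem_filterMap.2 ⟨arc, hm, ht⟩)
  have hK : pvK (pvU W minimo) [] ≤ W.length + 1 := by
    unfold pvK
    calc ((pvU W minimo).toFinset.filter (fun v => v ∉ ([] : List Int))).card
        ≤ (pvU W minimo).toFinset.card := Finset.card_filter_le _ _
      _ ≤ (pvU W minimo).length := List.toFinset_card_le _
      _ ≤ W.length + 1 := by
          unfold pvU
          have := List.length_filterMap_le (fun (a : PvArc) => a.2.head?) W
          simp only [List.length_cons]
          omega
  have h := pvMain W (pvU W minimo) hU (W.length + 1) (W.length + 1) minimo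
    (fun _ => False) PySem.Set.empty (PySem.Set.ofList W1) W1
    (by simp [pvU]) List.nodup_nil (by intro v hv; cases hv) hK hK
    (pvPre_acyc W minimo hpre.2.2) (by intro u _ h; exact h)
    (by intro v hv; cases hv) (fun a => PySem.Set.mem_ofList _ _)
  exact h.1.1
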